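-- pv_equiv track=rewrite | github.com/tomergol15/cyber-tomer | assignment1/Phishing_Detector.py | checking_suspicious_words
-- ===== SOURCE A (Python) =====
-- def checking_suspicious_words(txt):
--     suspicious_words = [
--         "urgent", "immediately", "action required", "verify", "update",
--         "login", "account suspended", "click here", "confirm", "security alert",
--         "your account will be closed", "limited access", "unauthorized", "final warning", "act now"
--     ]
--
--     txt = txt.lower()
--     for word in suspicious_words:
--         if word in txt:
--             return True
--
--     return False
-- ===== SOURCE B (Python) =====
-- SUSPICIOUS_WORDS = [
--     "urgent", "immediately", "action required", "verify", "update",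
--     "login", "account suspended", "click here", "confirm", "security alert",
--     "your account will be closed", "limited access", "unauthorized", "final warning", "act now"
-- ]
--
-- def checking_suspicious_words(txt):
--     # One pass over the lowered text: at each position, does some phrase start here?
--     t = txt.lower()
--     for i in range(len(t)):
--         for w in SUSPICIOUS_WORDS:
--             if t.startswith(w, i):
--                 return True
--     return False
-- ===== Notes on version B (the rewrite author's own statement) =====
-- stated objective: alternative
-- what changed: Replaces fifteen independent substring searches over the text with a single left-to-right scan that at each position tests whether any phrase starts there.
import Mathlib
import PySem

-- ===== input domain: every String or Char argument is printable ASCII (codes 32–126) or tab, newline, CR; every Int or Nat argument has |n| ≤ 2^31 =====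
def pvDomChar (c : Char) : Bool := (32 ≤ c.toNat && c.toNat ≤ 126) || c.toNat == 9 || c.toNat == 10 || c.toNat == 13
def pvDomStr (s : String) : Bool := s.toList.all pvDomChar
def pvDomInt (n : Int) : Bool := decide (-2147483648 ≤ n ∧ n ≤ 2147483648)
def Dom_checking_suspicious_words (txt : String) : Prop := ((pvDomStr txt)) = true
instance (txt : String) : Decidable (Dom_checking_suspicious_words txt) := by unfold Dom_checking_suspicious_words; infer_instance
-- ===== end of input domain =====

-- B replaces A's fifteen separate substring searches by one left-to-right scan of the
-- lowered text that tests at each position whether any phrase starts there (alternative traversal, same cost class).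



-- ===== PORT A =====
-- the literal phrase list of A
def pvSuspiciousWords : List String :=
  ["urgent", "immediately", "action required", "verify", "update",
   "login", "account suspended", "click here", "confirm", "security alert",
   "your account will be closed", "limited access", "unauthorized", "final warning", "act now"]

-- A's loop: for word in suspicious_words: if word in txt: return True; return False
def pvALoop (ws : List String) (t : String) : Bool :=
  match ws with
  | [] => false
  | w :: rest => if PySem.Str.isIn w t then true else pvALoop rest t

def checking_suspicious_words (txt : String) : Bool :=
  pvALoop pvSuspiciousWords (PySem.Str.lower txt)

-- ===== PORT B =====
-- B's inner loop at one position: t.startswith(w, i) over the suffix (exact by hand: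
-- startswith at position i on ASCII text is prefix-of-the-i-th-suffix)
def pvBInner (ws : List String) (suffix : List Char) : Bool :=
  match ws with
  | [] => false
  | w :: rest => if w.toList.isPrefixOf suffix then true else pvBInner rest suffix

-- B's outer loop: for i in range(len(t)), as structural recursion over the suffixes of t
def pvBScan (cs : List Char) : Bool :=
  match cs with
  | [] => false
  | _ :: t => if pvBInner pvSuspiciousWords cs then true else pvBScan t

def checking_suspicious_words_alt (txt : String) : Bool :=
  pvBScan (PySem.Str.lower txt).toList

-- ===== PRECONDITION & SPEC =====
def Spec_checking_suspicious_words (txt : String) (out : Bool) : Prop := out = checking_suspicious_words_alt txt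
instance (txt : String) (out : Bool) : Decidable (Spec_checking_suspicious_words txt out) := by unfold Spec_checking_suspicious_words; infer_instance

-- ===== CLAIM (what is proved, stated in full; the proofs are below) =====
def Claim_equal_checking_suspicious_words : Prop := ∀ (txt : String), Dom_checking_suspicious_words txt → Spec_checking_suspicious_words txt (checking_suspicious_words txt)

-- ===== LEMMAS AND PROOFS =====

lemma pvALoop_eq_any (ws : List String) (t : String) :
    pvALoop ws t = ws.any (fun w => PySem.Str.isIn w t) := by
  induction ws with
  | nil => rfl
  | cons w rest ih =>
    simp only [pvALoop, List.any_cons, ih]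
    rw [Bool.eq_iff_iff]
    by_cases h : PySem.Str.isIn w t = true
    · simp only [PySem.Str.isIn_eq] at h
      simp [h]
    · have h2 : PySem.Str.isIn w t = false := Bool.eq_false_iff.mpr h
      simp only [PySem.Str.isIn_eq] at h2
      simp [h2]

lemma pvBInner_eq_any (ws : List String) (s : List Char) :
    pvBInner ws s = ws.any (fun w => w.toList.isPrefixOf s) := by
  induction ws with
  | nil => rfl
  | cons w rest ih =>
    simp only [pvBInner, List.any_cons, ih]
    split_ifs with h <;> [simp [h]; (rw [Bool.eq_iff_iff]; simp [h])]

lemma pvBScan_iff (cs : List Char) :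
    pvBScan cs = true ↔ ∃ w ∈ pvSuspiciousWords, w.toList <:+: cs := by
  induction cs with
  | nil =>
    simp only [pvBScan]
    constructor
    · intro h; exact absurd h (by decide)
    · rintro ⟨w, hw, hinf⟩
      have : w.toList = [] := List.eq_nil_of_infix_nil hinf
      fin_cases hw <;> simp_all
  | cons c t ih =>
    simp only [pvBScan, pvBInner_eq_any]
    constructor
    · intro h
      split_ifs at h with hp
      · simp only [List.any_eq_true] at hp
        obtain ⟨w, hw, hpre⟩ := hp
        exact ⟨w, hw, (List.isPrefixOf_iff_prefix.mp hpre).isInfix⟩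
      · obtain ⟨w, hw, hinf⟩ := ih.mp h
        exact ⟨w, hw, hinf.trans (List.suffix_cons c t).isInfix⟩
    · rintro ⟨w, hw, hinf⟩
      rcases List.infix_cons_iff.mp hinf with hpre | hinf'
      · have : (pvSuspiciousWords.any (fun w => w.toList.isPrefixOf (c :: t))) = true := by
          simp only [List.any_eq_true]
          exact ⟨w, hw, List.isPrefixOf_iff_prefix.mpr hpre⟩
        simp [this]
      · have := ih.mpr ⟨w, hw, hinf'⟩
        split_ifs <;> simp [this]

-- ===== VERDICT (by name: the statement is the Claim_ definition above) =====
theorem checking_suspicious_words_spec : Claim_equal_checking_suspicious_words := by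
  intro txt _
  unfold Spec_checking_suspicious_words
  unfold checking_suspicious_words checking_suspicious_words_alt
  rw [pvALoop_eq_any]
  rcases hB : pvBScan (PySem.Str.lower txt).toList with _ | _
  · have hnot := (not_iff_not.mpr (pvBScan_iff (PySem.Str.lower txt).toList)).mp (by rw [hB]; decide)
    rw [Bool.eq_iff_iff]
    simp only [List.any_eq_true]
    constructor
    · rintro ⟨w, hw, hin⟩
      exact absurd ⟨w, hw, (PySem.Str.isIn_iff_infix w _).mp hin⟩ hnot
    · intro hf; exact absurd hf (by decide)
  · obtain ⟨w, hw, hinf⟩ := (pvBScan_iff _).mp hB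
    simp only [List.any_eq_true]
    exact ⟨w, hw, (PySem.Str.isIn_iff_infix w _).mpr hinf⟩
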